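-- pv_equiv track=rewrite | github.com/martinsantos/licitometro | backend/services/generic_enrichment.py | _find_best_alt_url
-- ===== SOURCE A (Python) =====
-- from typing import Dict, Any, List, Optional
--
-- def _find_best_alt_url(source_urls: dict) -> Optional[str]:
--     """Find the best alternative URL from source_urls dict, skipping proxies and list pages."""
--     if not source_urls:
--         return None
--     for key in sorted(source_urls.keys()):
--         url = source_urls[key]
--         if not url or not isinstance(url, str):
--             continue
--         if "localhost:" in url:
--             continue
--         # Prefer detail pages over list pages
--         if "detail" in key or "pliego" in key:
--             return url
--     # Fallback: any non-proxy URL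
--     for url in source_urls.values():
--         if url and isinstance(url, str) and "localhost:" not in url:
--             return url
--     return None
-- ===== SOURCE B (Python) =====
-- from typing import Optional
--
-- def _find_best_alt_url(source_urls: dict) -> Optional[str]:
--     """Single pass: track the valid detail/pliego entry with the smallest key,
--     plus the first valid url (insertion order) as fallback."""
--     best_key = None
--     best_url = None
--     fallback = None
--     for key, url in source_urls.items():
--         if not url or not isinstance(url, str) or "localhost:" in url:
--             continue
--         if ("detail" in key or "pliego" in key) and (best_key is None or key < best_key):
--             best_key, best_url = key, url
--         if fallback is None:
--             fallback = url
--     return best_url if best_key is not None else fallback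
-- ===== Notes on version B (the rewrite author's own statement) =====
-- stated objective: faster
-- what changed: Replaces sort-then-scan plus a second fallback scan over the values with one pass over the items that tracks the minimum-key valid detail/pliego entry and the first valid fallback url.
import Mathlib
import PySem

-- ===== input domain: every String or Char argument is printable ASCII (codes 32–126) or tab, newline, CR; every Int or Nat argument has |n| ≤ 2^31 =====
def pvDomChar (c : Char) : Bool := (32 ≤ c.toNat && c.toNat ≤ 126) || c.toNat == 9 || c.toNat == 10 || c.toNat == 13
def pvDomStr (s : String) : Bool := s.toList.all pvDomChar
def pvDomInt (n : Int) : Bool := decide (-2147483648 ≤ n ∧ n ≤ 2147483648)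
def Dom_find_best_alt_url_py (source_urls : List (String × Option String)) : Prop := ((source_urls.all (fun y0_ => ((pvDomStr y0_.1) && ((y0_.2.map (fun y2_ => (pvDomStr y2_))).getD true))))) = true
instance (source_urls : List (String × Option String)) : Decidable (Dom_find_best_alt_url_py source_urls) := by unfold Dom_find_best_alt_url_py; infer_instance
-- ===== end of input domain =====

-- B replaces A's sort-then-scan (plus a second fallback scan over the values) with a single pass
-- that tracks the minimum-key valid detail/pliego entry and the first valid fallback url (objective: faster).

-- ===== PORT A =====
-- shared with port B: '"detail" in key or "pliego" in key'
def pvDetailKey (k : String) : Bool := PySem.Str.isIn "detail" k || PySem.Str.isIn "pliego" k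

-- shared with port B: '"localhost:" in url'
def pvLocal (u : String) : Bool := PySem.Str.isIn "localhost:" u

-- source_urls[key] (key always present, so the none branch is unreachable for A's calls)
def pvLookup (d : List (String × Option String)) (k : String) : Option String :=
  match d.find? (fun p => p.1 == k) with
  | some p => p.2
  | none => none

-- the 'for key in sorted(source_urls.keys())' loop
def pvScanA : List String → List (String × Option String) → Option String
  | [], _ => none
  | k :: ks, d =>
    match pvLookup d k with
    | none => pvScanA ks d                                   -- not url
    | some u =>
      if u == "" then pvScanA ks d                           -- not url
      else if pvLocal u then pvScanA ks d
      else if pvDetailKey k then some u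
      else pvScanA ks d

-- the 'for url in source_urls.values()' fallback loop
def pvFallbackA : List (Option String) → Option String
  | [] => none
  | u? :: rest =>
    match u? with
    | none => pvFallbackA rest
    | some u =>
      if !(u == "") && !(pvLocal u) then some u
      else pvFallbackA rest

def find_best_alt_url_py (source_urls : List (String × Option String)) : Option String :=
  if source_urls = [] then none
  else
    match pvScanA (PySem.List.sorted (source_urls.map Prod.fst) (fun k => k) false) source_urls with
    | some u => some u
    | none => pvFallbackA (source_urls.map Prod.snd)

-- ===== PORT B =====
-- state: (best detail (key, url) so far, first valid fallback url)
def pvStepB (st : Option (String × String) × Option String) (p : String × Option String) :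
    Option (String × String) × Option String :=
  match p.2 with
  | none => st                                               -- not url / not a str
  | some u =>
    if u == "" || pvLocal u then st      -- not url / proxy
    else
      let best := if pvDetailKey p.1 &&
                     (match st.1 with | none => true | some b => decide (p.1 < b.1))
                  then some (p.1, u) else st.1
      let fb := match st.2 with | none => some u | some _ => st.2
      (best, fb)

def find_best_alt_url_py_alt (source_urls : List (String × Option String)) : Option String :=
  let st := source_urls.foldl pvStepB (none, none)
  match st.1 with
  | some b => some b.2
  | none => st.2

-- ===== PRECONDITION & SPEC =====
-- Pre_ excludes association lists with duplicate keys: a Python dict cannot contain them,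
-- so such lists have no dict counterpart and the first-vs-last-match choice is arbitrary.
def Pre_find_best_alt_url_py (source_urls : List (String × Option String)) : Prop :=
  (source_urls.map Prod.fst).Nodup
instance (source_urls : List (String × Option String)) : Decidable (Pre_find_best_alt_url_py source_urls) := by unfold Pre_find_best_alt_url_py; infer_instance

def pvWitness_find_best_alt_url_py : (List (String × Option String)) :=
  [("z_detail", some "http://x/detail"), ("a", some "http://y"), ("b", none)]

def Spec_find_best_alt_url_py (source_urls : List (String × Option String)) (out : Option String) : Prop := out = find_best_alt_url_py_alt source_urls
instance (source_urls : List (String × Option String)) (out : Option String) : Decidable (Spec_find_best_alt_url_py source_urls out) := by unfold Spec_find_best_alt_url_py; infer_instance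

-- ===== CLAIM (what is proved, stated in full; the proofs are below) =====
def Claim_equal_find_best_alt_url_py : Prop := ∀ (source_urls : List (String × Option String)), Dom_find_best_alt_url_py source_urls → Pre_find_best_alt_url_py source_urls → Spec_find_best_alt_url_py source_urls (find_best_alt_url_py source_urls)

-- ===== LEMMAS AND PROOFS =====

-- validity test on a stored value ('url and isinstance(url, str) and "localhost:" not in url')
def pvValid : Option String → Bool
  | none => false
  | some u => !(u == "") && !(pvLocal u)

-- an entry that A's first loop would return: valid value and detail/pliego key
def pvGood (p : String × Option String) : Bool := pvValid p.2 && pvDetailKey p.1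

-- the key test A's first loop applies, phrased on keys via lookup
def pvCond (d : List (String × Option String)) (k : String) : Bool :=
  pvValid (pvLookup d k) && pvDetailKey k

theorem pvScanA_eq (ks : List String) (d : List (String × Option String)) :
    pvScanA ks d = match ks.find? (pvCond d) with
      | some k => pvLookup d k
      | none => none := by
  induction ks with
  | nil => rfl
  | cons k ks ih =>
    simp only [pvScanA, List.find?, pvCond, pvValid]
    cases h : pvLookup d k with
    | none => simpa using ih
    | some u =>
      by_cases h1 : u = ""
      · simp [h1, ih]
      · have he : (u == "") = false := by simpa using h1
        by_cases h2 : pvLocal u = true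
        · simp [he, h2, ih]
        · have hl : pvLocal u = false := by simpa using h2
          by_cases h3 : pvDetailKey k
          · simp [he, hl, h3, h]
          · simp [he, hl, h3, ih]

-- a member's value via first-match lookup, under unique keys
theorem pvLookup_of_mem (d : List (String × Option String)) (p : String × Option String)
    (hnd : (d.map Prod.fst).Nodup) (hp : p ∈ d) : pvLookup d p.1 = p.2 := by
  induction d with
  | nil => cases hp
  | cons q d ih =>
    simp only [List.map, List.nodup_cons] at hnd
    rcases List.mem_cons.mp hp with h | h
    · subst h; simp [pvLookup, List.find?]
    · have hne : q.1 ≠ p.1 := by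
        intro he
        exact hnd.1 (he ▸ List.mem_map.mpr ⟨p, h, rfl⟩)
      have := ih hnd.2 h
      simp only [pvLookup, List.find?] at this ⊢
      have : (q.1 == p.1) = false := by simpa using hne
      simp [this]
      exact ih hnd.2 h

-- B's fold, fallback component: first valid value (insertion order), i.e. A's fallback loop
theorem pvFold_snd (d : List (String × Option String)) :
    ∀ (b : Option (String × String)) (fb : Option String),
      (d.foldl pvStepB (b, fb)).2 =
        match fb with
        | some v => some v
        | none => pvFallbackA (d.map Prod.snd) := by
  induction d with
  | nil => intro b fb; cases fb <;> rfl
  | cons p d ih =>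
    intro b fb
    simp only [List.foldl, List.map]
    cases hp : p.2 with
    | none =>
      simp only [pvStepB, hp, pvFallbackA]
      exact ih b fb
    | some u =>
      simp only [pvStepB, hp, pvFallbackA]
      by_cases h : (u == "" || pvLocal u) = true
      · have h' : (!(u == "") && !(pvLocal u)) = false := by
          rcases Bool.or_eq_true_iff.mp h with h | h <;> simp [h]
        simp [h, h']
        exact ih b fb
      · have h' : (!(u == "") && !(pvLocal u)) = true := by
          simp only [Bool.or_eq_true_iff, not_or] at h
          simp [Bool.not_eq_true] at h ⊢
          exact ⟨h.1, h.2⟩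
        simp only [h, Bool.not_eq_true] at *
        cases fb with
        | none => simp [h', ih]
        | some v => simp [ih]

-- B's min-tracking step, restricted to good entries
def pvMinStep (b : Option (String × String)) (p : String × Option String) :
    Option (String × String) :=
  match p.2 with
  | none => b
  | some u =>
    match b with
    | none => some (p.1, u)
    | some q => if p.1 < q.1 then some (p.1, u) else b

-- B's fold, best component = min-tracking fold over the good entries
theorem pvFold_fst (d : List (String × Option String)) :
    ∀ (b : Option (String × String)) (fb : Option String),
      (d.foldl pvStepB (b, fb)).1 = (d.filter pvGood).foldl pvMinStep b := by
  induction d with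
  | nil => intro b fb; rfl
  | cons p d ih =>
    intro b fb
    cases hp : p.2 with
    | none =>
      have hg : pvGood p = false := by simp [pvGood, pvValid, hp]
      have hstep : pvStepB (b, fb) p = (b, fb) := by simp [pvStepB, hp]
      rw [List.foldl_cons, hstep, ih b fb]
      simp [hg]
    | some u =>
      by_cases h : (u == "" || pvLocal u) = true
      · have hg : pvGood p = false := by
          rcases Bool.or_eq_true_iff.mp h with h' | h' <;> simp [pvGood, pvValid, hp, h']
        have hstep : pvStepB (b, fb) p = (b, fb) := by simp [pvStepB, hp, h]
        rw [List.foldl_cons, hstep, ih b fb]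
        simp [hg]
      · by_cases hdt : pvDetailKey p.1 = true
        · have hg : pvGood p = true := by
            simp only [Bool.or_eq_true_iff, not_or] at h
            simp [pvGood, pvValid, hp, hdt, Bool.not_eq_true] at h ⊢
            exact ⟨h.1, h.2⟩
          have hstep : pvStepB (b, fb) p =
              (pvMinStep b p, match fb with | none => some u | some _ => fb) := by
            cases b with
            | none => simp [pvStepB, pvMinStep, hp, h, hdt]
            | some q => by_cases hlt : p.1 < q.1 <;> simp [pvStepB, pvMinStep, hp, h, hdt, hlt]
          rw [List.foldl_cons, hstep, ih]
          simp [hg]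
        · have hg : pvGood p = false := by simp [pvGood, hdt]
          have hstep : pvStepB (b, fb) p =
              (b, match fb with | none => some u | some _ => fb) := by
            simp [pvStepB, hp, h, hdt]
          rw [List.foldl_cons, hstep, ih]
          simp [hg]

-- every good entry has a some value
theorem pvGood_isSome {p : String × Option String} (h : pvGood p = true) :
    ∃ u, p.2 = some u := by
  cases hp : p.2 with
  | none => simp [pvGood, pvValid, hp] at h
  | some u => exact ⟨u, rfl⟩

-- characterization of the min-tracking fold from the empty state
theorem pvMinFold_spec (xs : List (String × Option String))
    (hxs : ∀ p ∈ xs, ∃ u, p.2 = some u) :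
    ∀ (b : Option (String × String)),
      match xs.foldl pvMinStep b with
      | none => b = none ∧ xs = []
      | some (k, u) =>
          (b = some (k, u) ∨ (k, some u) ∈ xs) ∧
          (∀ q, b = some q → k ≤ q.1) ∧ (∀ p ∈ xs, k ≤ p.1) := by
  induction xs with
  | nil =>
    intro b
    cases b with
    | none => exact ⟨rfl, rfl⟩
    | some q => exact ⟨Or.inl rfl, fun q' hq => by simp_all, by simp⟩
  | cons p xs ih =>
    intro b
    obtain ⟨u, hu⟩ := hxs p (List.mem_cons_self ..)
    have hxs' : ∀ p ∈ xs, ∃ u, p.2 = some u := fun q hq => hxs q (List.mem_cons_of_mem _ hq)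
    have ih' := (ih hxs' : ∀ b', _)
    simp only [List.foldl]
    have hb' : ∃ k0 u0, pvMinStep b p = some (k0, u0) ∧ ((k0, some u0) = p ∨ b = some (k0, u0)) ∧
        k0 ≤ p.1 ∧ (∀ q, b = some q → k0 ≤ q.1) := by
      cases b with
      | none =>
        exact ⟨p.1, u, by simp [pvMinStep, hu], Or.inl (by rw [← hu]), le_refl _, by simp⟩
      | some q =>
        by_cases hlt : p.1 < q.1
        · exact ⟨p.1, u, by simp [pvMinStep, hu, hlt], Or.inl (by rw [← hu]), le_refl _,
            fun q' hq' => by cases hq'; exact le_of_lt hlt⟩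
        · exact ⟨q.1, q.2, by simp [pvMinStep, hu, hlt], Or.inr rfl, le_of_not_gt hlt,
            fun q' hq' => by cases hq'; exact le_refl _⟩
    obtain ⟨k0, u0, hstep, hmem0, hle0, hleb⟩ := hb'
    rw [hstep]
    have := ih' (some (k0, u0))
    cases hres : xs.foldl pvMinStep (some (k0, u0)) with
    | none => rw [hres] at this; exact absurd this.1 (by simp)
    | some r =>
      obtain ⟨k, v⟩ := r
      rw [hres] at this
      obtain ⟨hmem, hq, hmin⟩ := this
      refine ⟨?_, ?_, ?_⟩
      · rcases hmem with h | h
        · obtain ⟨hk, hv⟩ : k0 = k ∧ u0 = v := by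
            have h' := Option.some.inj h
            exact ⟨congrArg Prod.fst h', congrArg Prod.snd h'⟩
          subst hk; subst hv
          rcases hmem0 with h2 | h2
          · exact Or.inr (List.mem_cons.mpr (Or.inl h2))
          · exact Or.inl h2
        · exact Or.inr (List.mem_cons_of_mem _ h)
      · intro q hbq
        exact le_trans (hq _ rfl) (hleb q hbq)
      · intro p' hp'
        rcases List.mem_cons.mp hp' with h | h
        · exact le_trans (hq _ rfl) (h ▸ hle0)
        · exact hmin p' h

-- the good keys, as key list: filtering the keys by A's test = keys of the good entries
theorem pvKeys_filter (d : List (String × Option String))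
    (hnd : (d.map Prod.fst).Nodup) :
    (d.map Prod.fst).filter (pvCond d) = (d.filter pvGood).map Prod.fst := by
  rw [List.filter_map, List.filter_congr (fun p hp => ?_)]
  simp only [Function.comp, pvCond, pvGood, pvLookup_of_mem d p hnd hp]

-- ===== VERDICT (by name: the statement is the Claim_ definition above) =====
theorem find_best_alt_url_py_spec : Claim_equal_find_best_alt_url_py := by
  intro d _ hnd
  unfold Spec_find_best_alt_url_py
  unfold Pre_find_best_alt_url_py at hnd
  -- names
  set L := PySem.List.sorted (d.map Prod.fst) (fun k => k) false with hL
  have hperm : L.Perm (d.map Prod.fst) := PySem.List.sorted_perm ..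
  have hfperm : (L.filter (pvCond d)).Perm ((d.map Prod.fst).filter (pvCond d)) :=
    hperm.filter _
  have hkeys := pvKeys_filter d hnd
  -- B's two components
  have hsnd := pvFold_snd d none none
  have hfst := pvFold_fst d none none
  have hgood : ∀ p ∈ d.filter pvGood, ∃ u, p.2 = some u := by
    intro p hp
    exact pvGood_isSome (List.of_mem_filter hp)
  have hmin := pvMinFold_spec (d.filter pvGood) hgood none
  unfold find_best_alt_url_py find_best_alt_url_py_alt
  rw [pvScanA_eq, ← List.head?_filter]
  cases hres : (d.filter pvGood).foldl pvMinStep none with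
  | none =>
    -- no good entry: both fall back
    rw [hres] at hmin
    have hfe : d.filter pvGood = [] := hmin.2
    have hLf : L.filter (pvCond d) = [] := by
      have : (d.map Prod.fst).filter (pvCond d) = [] := by rw [hkeys, hfe]; rfl
      exact List.Perm.nil_eq ((this ▸ hfperm : (L.filter (pvCond d)).Perm [])).symm |>.symm
    rw [hLf]
    simp only [List.head?]
    rw [hsnd, hfst, hres]
    by_cases hdnil : d = []
    · subst hdnil; rfl
    · simp [hdnil]
  | some r =>
    obtain ⟨k, u⟩ := r
    rw [hres] at hmin
    obtain ⟨hmem, _, hminle⟩ := hmin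
    have hmem' : (k, some u) ∈ d.filter pvGood := by
      rcases hmem with h | h
      · exact absurd h (by simp)
      · exact h
    -- the sorted filtered key list is nonempty; its head is k
    have hkmem : k ∈ L.filter (pvCond d) := by
      refine hfperm.mem_iff.mpr ?_
      rw [hkeys]
      exact List.mem_map.mpr ⟨(k, some u), hmem', rfl⟩
    obtain ⟨m, t, hcons⟩ : ∃ m t, L.filter (pvCond d) = m :: t := by
      cases hc : L.filter (pvCond d) with
      | nil => rw [hc] at hkmem; cases hkmem
      | cons m t => exact ⟨m, t, rfl⟩
    -- m is minimal among filtered keys; k is in that set and minimal too, so m = k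
    have hpair : L.Pairwise (· ≤ ·) := by
      have := PySem.List.sorted_pairwise (xs := d.map Prod.fst) (key := fun k => k)
      simpa using this
    have hmmin : ∀ x ∈ L.filter (pvCond d), m ≤ x := by
      have hp : (L.filter (pvCond d)).Pairwise (· ≤ ·) := hpair.filter _
      rw [hcons] at hp
      intro x hx
      rw [hcons] at hx
      rcases List.mem_cons.mp hx with h | h
      · exact h ▸ le_refl m
      · exact (List.pairwise_cons.mp hp).1 x h
    have hmk : m = k := by
      have h1 : m ≤ k := hmmin k hkmem
      have h2 : k ≤ m := by
        have hm : m ∈ (d.filter pvGood).map Prod.fst := by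
          rw [← hkeys]
          exact hfperm.mem_iff.mp (hcons ▸ List.mem_cons_self ..)
        obtain ⟨p0, hp0, hp0k⟩ := List.mem_map.mp hm
        exact hp0k ▸ hminle p0 hp0
      exact le_antisymm h1 h2
    rw [hcons]
    simp only [List.head?]
    have hlook : pvLookup d k = some u :=
      pvLookup_of_mem d (k, some u) hnd (List.mem_of_mem_filter hmem')
    have hdne : d ≠ [] := by
      intro hnil
      rw [hnil] at hmem'
      cases hmem'
    rw [hmk, hlook, hsnd, hfst, hres]
    simp [hdne]
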